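-- pv_equiv track=rewrite | github.com/kartikeyas00/LottoProblemSolved | LottoProblemSolved.py | final_tickets
-- ===== SOURCE A (Python) =====
-- def final_tickets(groups_needed,tickets): # This method produces uneliminated final tickets
--     final_tickets = set()
--     while groups_needed:
--         best_ticket = None
--         groups_covered = set()
--         for ticket, groups in tickets.items():
--             covered = groups_needed & groups
--             if len(covered) > len(groups_covered):
--                 best_ticket = ticket
--                 groups_covered = covered
--         groups_needed -= groups_covered
--         final_tickets.add(best_ticket)
--     return final_tickets
-- ===== SOURCE B (Python) =====
-- # Return-value equivalence only: A mutates the groups_needed set in place; B does not mutate its arguments.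
-- def final_tickets(groups_needed, tickets):
--     # Lazy greedy: a priority list of (stale coverage bound, insertion index), best
--     # first.  On pop, only the popped ticket's coverage is recomputed; if the bound
--     # is still exact the ticket is selected, otherwise it is reinserted with the
--     # refreshed bound.  Coverage only shrinks as groups get satisfied, so stale
--     # bounds are upper bounds and the first fresh pop is exactly A's greedy
--     # (first-maximal) choice; all the other tickets are left untouched that round.
--     items = list(tickets.items())
--     order = []
--     for i, (_, g) in enumerate(items):
--         c = len(groups_needed & g)
--         if c:
--             _insert(order, (c, i))
--     needed = set(groups_needed)
--     chosen = set()
--     while needed: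
--         s, i = order.pop(0)
--         cov = needed & items[i][1]
--         if len(cov) < s:
--             if cov:
--                 _insert(order, (len(cov), i))
--         else:
--             chosen.add(items[i][0])
--             needed -= cov
--     return chosen
--
-- def _insert(order, entry):
--     # keep 'order' sorted by (-coverage, index): insert before the first not-better slot
--     j = 0
--     while j < len(order) and (order[j][0] > entry[0]
--                               or (order[j][0] == entry[0] and order[j][1] < entry[1])):
--         j += 1
--     order.insert(j, entry)
-- ===== Notes on version B (the rewrite author's own statement) =====
-- stated objective: alternative
-- what changed: B is a lazy greedy: it builds once a priority list of (coverage upper bound, insertion index) kept sorted by (-coverage, index), and each round pops the top and recomputes only that one ticket's coverage, selecting it if the bound is still exact and reinserting it with the refreshed bound otherwise, instead of A's re-intersecting every ticket with the needed set on every round.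
import Mathlib
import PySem

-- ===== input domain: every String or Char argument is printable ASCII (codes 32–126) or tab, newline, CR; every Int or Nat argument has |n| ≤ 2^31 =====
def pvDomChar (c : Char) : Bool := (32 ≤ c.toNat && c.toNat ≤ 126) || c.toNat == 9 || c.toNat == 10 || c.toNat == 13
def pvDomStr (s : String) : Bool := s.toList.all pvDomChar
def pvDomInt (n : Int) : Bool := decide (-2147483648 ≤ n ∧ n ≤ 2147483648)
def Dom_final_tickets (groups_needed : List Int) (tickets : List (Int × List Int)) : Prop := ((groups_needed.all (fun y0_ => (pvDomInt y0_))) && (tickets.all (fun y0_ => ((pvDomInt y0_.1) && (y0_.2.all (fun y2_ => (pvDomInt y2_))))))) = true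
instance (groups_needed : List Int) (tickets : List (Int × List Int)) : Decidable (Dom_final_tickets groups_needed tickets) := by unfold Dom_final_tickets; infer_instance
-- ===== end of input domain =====

-- B replaces A's per-round rescan of every ticket by a lazy greedy: a priority list of
-- stale coverage upper bounds, recomputing only the popped ticket's coverage each pop
-- (return-value equivalence only: Python A mutates groups_needed in place, B does not).

-- ===== PORT A =====
-- inner 'for ticket, groups in tickets.items()' scan: state (best_ticket, groups_covered)
def ftA_scan (needed : List Int) (tickets : List (Int × List Int)) : Option Int × List Int :=
  tickets.foldl
    (fun b tg =>
      if (needed.filter (fun x => tg.2.contains x)).length > b.2.length then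
        (some tg.1, needed.filter (fun x => tg.2.contains x))
      else b)
    (none, [])

-- 'while groups_needed:' loop; the fuel only makes the recursion total: when the best
-- coverage is empty (best_ticket is None) the Python loops forever — outside Pre_.
def ftA_go (tickets : List (Int × List Int)) : Nat → List Int → List Int → List Int
  | 0, _, acc => acc
  | fuel+1, needed, acc =>
    if needed.isEmpty then acc
    else
      let s := ftA_scan needed tickets
      let acc' := match s.1 with | some t => acc ++ [t] | none => acc
      if s.2.isEmpty then acc'
      else ftA_go tickets fuel (needed.filter (fun x => !s.2.contains x)) acc'

def final_tickets (groups_needed : List Int) (tickets : List (Int × List Int)) : List Int :=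
  ftA_go tickets (groups_needed.length + 1) groups_needed []

-- ===== PORT B =====
-- 'needed & g' of Source B
def ftCov (needed : List Int) (g : List Int) : List Int := needed.filter (fun x => g.contains x)

-- the while-condition of _insert: entry a sorts strictly before entry e ((-cov, idx) order)
def ftBetter (a e : Nat × Nat) : Bool := a.1 > e.1 || (a.1 == e.1 && a.2 < e.2)

-- '_insert(order, entry)': insert before the first not-better slot
def ftInsert (e : Nat × Nat) : List (Nat × Nat) → List (Nat × Nat)
  | [] => [e]
  | x :: xs => if ftBetter x e then x :: ftInsert e xs else e :: x :: xs

-- the build loop 'for i, (_, g) in enumerate(items): c = len(...); if c: _insert(...)'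
def ftBuild (groups_needed : List Int) (items : List (Int × List Int)) : List (Nat × Nat) :=
  items.zipIdx.foldl
    (fun ord gi =>
      if (ftCov groups_needed gi.1.2).length ≠ 0 then
        ftInsert ((ftCov groups_needed gi.1.2).length, gi.2) ord
      else ord) []

theorem ftInsert_perm (e : Nat × Nat) (l : List (Nat × Nat)) : (ftInsert e l).Perm (e :: l) := by
  induction l with
  | nil => simp [ftInsert]
  | cons x xs ih =>
    rw [ftInsert]
    split_ifs with h
    · exact (List.Perm.cons x ih).trans (List.Perm.swap e x xs)
    · exact List.Perm.refl _

theorem ftInsert_length (e : Nat × Nat) (l : List (Nat × Nat)) :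
    (ftInsert e l).length = l.length + 1 := by
  simpa using (ftInsert_perm e l).length_eq

theorem ftInsert_sum (e : Nat × Nat) (l : List (Nat × Nat)) :
    ((ftInsert e l).map Prod.fst).sum = e.1 + (l.map Prod.fst).sum := by
  simpa using ((ftInsert_perm e l).map Prod.fst).sum_eq

-- 'while needed:' loop of Source B; '| [] => acc' is Python's IndexError on pop — outside Pre_
def ftB_go (items : List (Int × List Int)) (needed : List Int) (order : List (Nat × Nat))
    (acc : List Int) : List Int :=
  if needed.isEmpty then acc
  else
    match order with
    | [] => acc
    | (s, i) :: rest =>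
      if (ftCov needed (items.getD i (0, [])).2).length < s then
        ftB_go items needed
          (if !(ftCov needed (items.getD i (0, [])).2).isEmpty then
            ftInsert ((ftCov needed (items.getD i (0, [])).2).length, i) rest
          else rest) acc
      else
        ftB_go items
          (needed.filter (fun x => !(ftCov needed (items.getD i (0, [])).2).contains x)) rest
          (acc ++ [(items.getD i (0, [])).1])
termination_by needed.length + order.length + (order.map Prod.fst).sum
decreasing_by
  · simp only [List.map_cons, List.sum_cons, List.length_cons]
    split_ifs with h
    · rw [ftInsert_length, ftInsert_sum]; omega
    · omega
  · rw [List.length_unattach, ← List.countP_eq_length_filter,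
      List.countP_attach (p := fun x => !(ftCov needed (items.getD i (0, [])).2).contains x),
      List.countP_eq_length_filter]
    have h1 := List.length_filter_le
      (fun x => !(ftCov needed (items.getD i (0, [])).2).contains x) needed
    simp only [List.map_cons, List.sum_cons, List.length_cons]
    omega

def final_tickets_alt (groups_needed : List Int) (tickets : List (Int × List Int)) : List Int :=
  ftB_go tickets groups_needed (ftBuild groups_needed tickets) []

-- ===== PRECONDITION & SPEC =====
-- Pre_: every needed group is covered by some ticket; otherwise Python A never returns
-- (the greedy loop removes nothing and spins forever), so A returns exactly on Pre_.
def Pre_final_tickets (groups_needed : List Int) (tickets : List (Int × List Int)) : Prop :=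
  ∀ g ∈ groups_needed, ∃ tg ∈ tickets, g ∈ tg.2
instance (groups_needed : List Int) (tickets : List (Int × List Int)) :
    Decidable (Pre_final_tickets groups_needed tickets) := by unfold Pre_final_tickets; infer_instance

def pvWitness_final_tickets : List Int × (List (Int × List Int)) :=
  ([1, 2, 3], [(10, [1, 2]), (11, [3])])

def Spec_final_tickets (groups_needed : List Int) (tickets : List (Int × List Int)) (out : List Int) : Prop := out = final_tickets_alt groups_needed tickets
instance (groups_needed : List Int) (tickets : List (Int × List Int)) (out : List Int) : Decidable (Spec_final_tickets groups_needed tickets out) := by unfold Spec_final_tickets; infer_instance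

-- ===== CLAIM (what is proved, stated in full; the proofs are below) =====
def Claim_equal_final_tickets : Prop := ∀ (groups_needed : List Int) (tickets : List (Int × List Int)), Dom_final_tickets groups_needed tickets → Pre_final_tickets groups_needed tickets → Spec_final_tickets groups_needed tickets (final_tickets groups_needed tickets)

-- ===== LEMMAS AND PROOFS =====

-- true current coverage of the ticket at index i
def ftTc (needed : List Int) (items : List (Int × List Int)) (i : Nat) : Nat :=
  (ftCov needed (items.getD i (0, [])).2).length

-- the loop invariant tying B's priority list to the true coverages:
-- sorted strictly by (-cov, idx); distinct indices; each stored value is an upper bound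
-- (≥ 1) on the true coverage; every ticket with positive true coverage is present
def ftInv (needed : List Int) (items : List (Int × List Int)) (order : List (Nat × Nat)) : Prop :=
  order.Pairwise (fun a b => ftBetter a b = true) ∧
  (order.map Prod.snd).Nodup ∧
  (∀ e ∈ order, e.2 < items.length ∧ 1 ≤ e.1 ∧ ftTc needed items e.2 ≤ e.1) ∧
  (∀ i, i < items.length → 1 ≤ ftTc needed items i → i ∈ order.map Prod.snd)

theorem ftBetter_total (a b : Nat × Nat) (h : a.2 ≠ b.2) :
    ftBetter a b = true ∨ ftBetter b a = true := by
  simp only [ftBetter, Bool.or_eq_true, Bool.and_eq_true, decide_eq_true_eq, beq_iff_eq]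
  omega

theorem ftBetter_trans {a b c : Nat × Nat} (h1 : ftBetter a b = true) (h2 : ftBetter b c = true) :
    ftBetter a c = true := by
  simp only [ftBetter, Bool.or_eq_true, Bool.and_eq_true, decide_eq_true_eq, beq_iff_eq] at *
  omega

theorem ftInsert_pairwise (e : Nat × Nat) (l : List (Nat × Nat))
    (hs : l.Pairwise (fun a b => ftBetter a b = true)) (hd : ∀ x ∈ l, x.2 ≠ e.2) :
    (ftInsert e l).Pairwise (fun a b => ftBetter a b = true) := by
  induction l with
  | nil => simp [ftInsert]
  | cons x xs ih =>
    rw [ftInsert]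
    rcases List.pairwise_cons.mp hs with ⟨hx, hxs⟩
    split_ifs with h
    · refine List.pairwise_cons.mpr ⟨?_, ih hxs (fun y hy => hd y (List.mem_cons_of_mem x hy))⟩
      intro y hy
      rcases List.mem_cons.mp ((ftInsert_perm e xs).mem_iff.mp hy) with rfl | hy
      · exact h
      · exact hx y hy
    · have he : ftBetter e x = true := by
        rcases ftBetter_total e x (fun hc => hd x (List.mem_cons_self ..) hc.symm) with h' | h'
        · exact h'
        · exact absurd h' h
      refine List.pairwise_cons.mpr ⟨?_, hs⟩
      intro y hy
      rcases List.mem_cons.mp hy with rfl | hy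
      · exact he
      · exact ftBetter_trans he (hx y hy)

-- coverage only shrinks when needed shrinks
theorem ftTc_filter_le (needed : List Int) (p : Int → Bool) (items : List (Int × List Int))
    (i : Nat) : ftTc (needed.filter p) items i ≤ ftTc needed items i := by
  unfold ftTc ftCov
  rw [List.filter_comm]
  exact List.length_filter_le ..

-- after selecting i and deleting its coverage, ticket i covers nothing
theorem ftTc_selected (needed : List Int) (items : List (Int × List Int)) (i : Nat) :
    ftTc (needed.filter (fun x => !(ftCov needed (items.getD i (0, [])).2).contains x)) items i
      = 0 := by
  unfold ftTc
  rw [List.length_eq_zero_iff, List.eq_nil_iff_forall_not_mem]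
  intro x hx
  unfold ftCov at hx
  rw [List.mem_filter] at hx
  obtain ⟨hx1, hx2⟩ := hx
  rw [List.mem_filter] at hx1
  obtain ⟨hxn, hxc⟩ := hx1
  have hmem : x ∈ ftCov needed (items.getD i (0, [])).2 :=
    List.mem_filter.mpr ⟨hxn, hx2⟩
  have hcont : (ftCov needed (items.getD i (0, [])).2).contains x = true := by
    simpa using hmem
  unfold ftCov at hcont
  rw [Bool.not_eq_true', hcont] at hxc
  cases hxc

-- removing a nonempty coverage strictly shrinks needed
theorem ftCov_shrinks (needed cov : List Int) (hsub : ∀ x ∈ cov, x ∈ needed) (hne : cov ≠ []) :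
    (needed.filter (fun x => !cov.contains x)).length < needed.length := by
  rcases hc : cov with _ | ⟨c, cs⟩
  · exact absurd hc hne
  · rw [List.length_filter_lt_length_iff_exists]
    exact ⟨c, hsub c (by rw [hc]; exact List.mem_cons_self ..), by simp [hc]⟩

-- A's scan is inert once nothing beats the accumulator
theorem ftA_scan_stay (needed : List Int) (l : List (Int × List Int)) (b : Option Int × List Int)
    (h : ∀ tg ∈ l, (needed.filter (fun x => tg.2.contains x)).length ≤ b.2.length) :
    l.foldl
      (fun b tg =>
        if (needed.filter (fun x => tg.2.contains x)).length > b.2.length then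
          (some tg.1, needed.filter (fun x => tg.2.contains x))
        else b) b = b := by
  induction l generalizing b with
  | nil => rfl
  | cons tg ts ih =>
    rw [List.foldl_cons,
      if_neg (by have := h tg (List.mem_cons_self ..); omega)]
    exact ih b (fun u hu => h u (List.mem_cons_of_mem tg hu))

-- A's scan returns the FIRST index of maximal (positive) coverage
theorem ftA_scan_first (needed : List Int) :
    ∀ (l : List (Int × List Int)) (i : Nat) (b : Option Int × List Int), i < l.length →
    b.2.length < (needed.filter (fun x => (l.getD i (0, [])).2.contains x)).length →
    (∀ k, k < l.length →
      (needed.filter (fun x => (l.getD k (0, [])).2.contains x)).length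
        ≤ (needed.filter (fun x => (l.getD i (0, [])).2.contains x)).length ∧
      ((needed.filter (fun x => (l.getD k (0, [])).2.contains x)).length
        = (needed.filter (fun x => (l.getD i (0, [])).2.contains x)).length → i ≤ k)) →
    l.foldl
      (fun b tg =>
        if (needed.filter (fun x => tg.2.contains x)).length > b.2.length then
          (some tg.1, needed.filter (fun x => tg.2.contains x))
        else b) b
      = (some (l.getD i (0, [])).1, needed.filter (fun x => (l.getD i (0, [])).2.contains x)) := by
  intro l
  induction l with
  | nil =>
    intro i b hi
    exact absurd hi (by simp)
  | cons tg ts ih =>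
    intro i b hi hb hmax
    rw [List.foldl_cons]
    cases i with
    | zero =>
      rw [show ((tg :: ts).getD 0 (0, [])) = tg from rfl] at hb hmax ⊢
      rw [if_pos (by omega)]
      apply ftA_scan_stay
      intro u hu
      obtain ⟨k, hk, hku⟩ := List.getElem_of_mem hu
      have hm := (hmax (k + 1) (by simp only [List.length_cons]; omega)).1
      rw [show ((tg :: ts).getD (k + 1) (0, [])) = ts.getD k (0, []) from rfl] at hm
      rw [List.getD_eq_getElem?_getD, List.getElem?_eq_getElem hk, Option.getD_some, hku] at hm
      exact hm
    | succ j =>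
      have hgd : ∀ m : Nat, (tg :: ts).getD (m + 1) (0, []) = ts.getD m (0, []) := fun m => rfl
      have h0 := hmax 0 (by simp only [List.length_cons]; omega)
      rw [show ((tg :: ts).getD 0 (0, [])) = tg from rfl, hgd] at h0
      have hlt : (needed.filter (fun x => tg.2.contains x)).length
          < (needed.filter (fun x => (ts.getD j (0, [])).2.contains x)).length := by
        rcases Nat.lt_or_ge (needed.filter (fun x => tg.2.contains x)).length
            (needed.filter (fun x => (ts.getD j (0, [])).2.contains x)).length with h | h
        · exact h
        · have := h0.2 (le_antisymm h0.1 h)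
          omega
      rw [hgd] at hb ⊢
      refine ih j _ (by simp only [List.length_cons] at hi; omega) ?_ ?_
      · split_ifs with h
        · simpa using hlt
        · omega
      · intro k hk
        have hm := hmax (k + 1) (by simp only [List.length_cons]; omega)
        rw [hgd, hgd] at hm
        exact ⟨hm.1, fun he => by have := hm.2 he; omega⟩

-- under the invariant, a fresh head of the priority list is exactly A's scan result
theorem ftA_scan_of_inv (needed : List Int) (items : List (Int × List Int))
    (s i : Nat) (rest : List (Nat × Nat))
    (hinv : ftInv needed items ((s, i) :: rest))
    (hfresh : ftTc needed items i = s) :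
    ftA_scan needed items
      = (some (items.getD i (0, [])).1,
         needed.filter (fun x => (items.getD i (0, [])).2.contains x)) := by
  obtain ⟨hsort, hnd, hent, hcomp⟩ := hinv
  have hhead := hent (s, i) (List.mem_cons_self ..)
  have hi : i < items.length := hhead.1
  have hs1 : 1 ≤ s := hhead.2.1
  have hmax : ∀ k, k < items.length →
      ftTc needed items k ≤ ftTc needed items i ∧
      (ftTc needed items k = ftTc needed items i → i ≤ k) := by
    intro k hk
    by_cases hk1 : 1 ≤ ftTc needed items k
    · have hkmem := hcomp k hk hk1
      obtain ⟨e, he, hek⟩ := List.mem_map.mp hkmem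
      rcases List.mem_cons.mp he with rfl | he
      · have hik : i = k := hek
        subst hik
        exact ⟨le_rfl, fun _ => le_rfl⟩
      · have hbe : ftBetter (s, i) e = true := (List.pairwise_cons.mp hsort).1 e he
        have hee := hent e (List.mem_cons_of_mem _ he)
        have he2k : e.2 = k := hek
        simp only [ftBetter, Bool.or_eq_true, Bool.and_eq_true, decide_eq_true_eq,
          beq_iff_eq] at hbe
        have htk : ftTc needed items k ≤ e.1 := he2k ▸ hee.2.2
        constructor
        · rw [hfresh]; omega
        · intro heq
          rw [hfresh] at heq
          omega
    · exact ⟨by rw [hfresh]; omega, fun heq => by rw [hfresh] at heq; omega⟩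
  have hmax' : ∀ k, k < items.length →
      (needed.filter (fun x => (items.getD k (0, [])).2.contains x)).length
        ≤ (needed.filter (fun x => (items.getD i (0, [])).2.contains x)).length ∧
      ((needed.filter (fun x => (items.getD k (0, [])).2.contains x)).length
        = (needed.filter (fun x => (items.getD i (0, [])).2.contains x)).length → i ≤ k) :=
    hmax
  have hb0 : ((none : Option Int), ([] : List Int)).2.length
      < (needed.filter (fun x => (items.getD i (0, [])).2.contains x)).length := by
    have hfr : (needed.filter (fun x => (items.getD i (0, [])).2.contains x)).length = s :=
      hfresh
    simp only [List.length_nil]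
    omega
  exact ftA_scan_first needed items i (none, []) hi hb0 hmax'

-- invariant preservation: stale pop, reinsertion (or drop) of the refreshed bound
theorem ftInv_stale (needed : List Int) (items : List (Int × List Int))
    (s i : Nat) (rest : List (Nat × Nat))
    (hinv : ftInv needed items ((s, i) :: rest))
    (hstale : ftTc needed items i < s) :
    ftInv needed items
      (if !(ftCov needed (items.getD i (0, [])).2).isEmpty then
        ftInsert ((ftCov needed (items.getD i (0, [])).2).length, i) rest
      else rest) := by
  obtain ⟨hsort, hnd, hent, hcomp⟩ := hinv
  have hsort' := (List.pairwise_cons.mp hsort).2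
  rw [List.map_cons] at hnd
  have hni : (s, i).2 ∉ rest.map Prod.snd := (List.nodup_cons.mp hnd).1
  have hnd' := (List.nodup_cons.mp hnd).2
  split_ifs with hne
  · have hc1 : 1 ≤ (ftCov needed (items.getD i (0, [])).2).length := by
      have hemp : ftCov needed (items.getD i (0, [])).2 ≠ [] := by
        intro hcon
        rw [hcon] at hne
        simp at hne
      have := List.length_pos_iff.mpr hemp
      omega
    refine ⟨?_, ?_, ?_, ?_⟩
    · apply ftInsert_pairwise _ _ hsort'
      intro x hx hxi
      have hxi' : x.2 = i := hxi
      have hmm : x.2 ∈ rest.map Prod.snd := List.mem_map.mpr ⟨x, hx, rfl⟩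
      rw [hxi'] at hmm
      exact hni hmm
    · rw [((ftInsert_perm ((ftCov needed (items.getD i (0, [])).2).length, i) rest).map
        Prod.snd).nodup_iff]
      rw [List.map_cons]
      exact List.nodup_cons.mpr ⟨hni, hnd'⟩
    · intro e he
      rcases List.mem_cons.mp ((ftInsert_perm _ _).mem_iff.mp he) with rfl | he
      · exact ⟨hent (s, i) (List.mem_cons_self ..) |>.1, hc1, le_rfl⟩
      · exact hent e (List.mem_cons_of_mem _ he)
    · intro k hk hk1
      have hkm := hcomp k hk hk1
      rw [List.map_cons] at hkm
      rcases List.mem_cons.mp hkm with rfl | hkm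
      · exact ((ftInsert_perm _ _).map Prod.snd).mem_iff.mpr (List.mem_cons_self ..)
      · exact ((ftInsert_perm _ _).map Prod.snd).mem_iff.mpr (List.mem_cons_of_mem _ hkm)
  · have hemp : ftCov needed (items.getD i (0, [])).2 = [] := by
      cases h' : (ftCov needed (items.getD i (0, [])).2).isEmpty with
      | false => rw [h'] at hne; simp at hne
      | true => exact List.isEmpty_iff.mp h'
    have hc0 : ftTc needed items i = 0 := by
      unfold ftTc
      rw [hemp]
      rfl
    refine ⟨hsort', hnd', fun e he => hent e (List.mem_cons_of_mem _ he), ?_⟩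
    intro k hk hk1
    have hkm := hcomp k hk hk1
    rw [List.map_cons] at hkm
    rcases List.mem_cons.mp hkm with rfl | hkm
    · exfalso
      omega
    · exact hkm

-- invariant preservation: a fresh pop selects i and deletes its coverage from needed
theorem ftInv_select (needed : List Int) (items : List (Int × List Int))
    (s i : Nat) (rest : List (Nat × Nat))
    (hinv : ftInv needed items ((s, i) :: rest)) :
    ftInv (needed.filter (fun x => !(ftCov needed (items.getD i (0, [])).2).contains x))
      items rest := by
  obtain ⟨hsort, hnd, hent, hcomp⟩ := hinv
  rw [List.map_cons] at hnd
  refine ⟨(List.pairwise_cons.mp hsort).2, (List.nodup_cons.mp hnd).2, ?_, ?_⟩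
  · intro e he
    have h := hent e (List.mem_cons_of_mem _ he)
    exact ⟨h.1, h.2.1, le_trans (ftTc_filter_le ..) h.2.2⟩
  · intro k hk hk1
    have hk1' : 1 ≤ ftTc needed items k := le_trans hk1 (ftTc_filter_le ..)
    have hkm := hcomp k hk hk1'
    rw [List.map_cons] at hkm
    rcases List.mem_cons.mp hkm with rfl | hkm
    · exfalso
      have hz := ftTc_selected needed items k
      omega
    · exact hkm

-- under Pre_, a nonempty needed forces a nonempty priority list
theorem ftOrder_ne_nil (needed : List Int) (items : List (Int × List Int))
    (order : List (Nat × Nat)) (hinv : ftInv needed items order)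
    (hne : needed ≠ []) (hpre : ∀ g ∈ needed, ∃ tg ∈ items, g ∈ tg.2) :
    order ≠ [] := by
  obtain ⟨g, hgm⟩ := List.exists_mem_of_ne_nil needed hne
  obtain ⟨tg, htg, hg⟩ := hpre g hgm
  obtain ⟨j, hj, hjg⟩ := List.getElem_of_mem htg
  have h1 : 1 ≤ ftTc needed items j := by
    unfold ftTc ftCov
    have hmem : g ∈ needed.filter (fun x => (items.getD j (0, [])).2.contains x) := by
      apply List.mem_filter.mpr
      refine ⟨hgm, ?_⟩
      rw [List.getD_eq_getElem?_getD, List.getElem?_eq_getElem hj, Option.getD_some, hjg]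
      simpa using hg
    have := List.length_pos_iff.mpr (List.ne_nil_of_mem hmem)
    omega
  have := hinv.2.2.2 j hj h1
  intro hcon
  rw [hcon] at this
  simp at this

-- unfolding equations for the well-founded ftB_go
theorem ftB_go_empty (items : List (Int × List Int)) (order : List (Nat × Nat))
    (acc : List Int) : ftB_go items [] order acc = acc := by
  rw [ftB_go.eq_def]
  simp

theorem ftB_go_cons (items : List (Int × List Int)) (needed : List Int) (s i : Nat)
    (rest : List (Nat × Nat)) (acc : List Int) (hne : needed ≠ []) :
    ftB_go items needed ((s, i) :: rest) acc =
      if (ftCov needed (items.getD i (0, [])).2).length < s then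
        ftB_go items needed
          (if !(ftCov needed (items.getD i (0, [])).2).isEmpty then
            ftInsert ((ftCov needed (items.getD i (0, [])).2).length, i) rest
          else rest) acc
      else
        ftB_go items
          (needed.filter (fun x => !(ftCov needed (items.getD i (0, [])).2).contains x)) rest
          (acc ++ [(items.getD i (0, [])).1]) := by
  rw [ftB_go.eq_def]
  simp [List.isEmpty_iff, hne]

-- the bisimulation: A's rescanning loop equals B's lazy loop whenever the invariant holds
theorem ftBisim (items : List (Int × List Int)) :
    ∀ (M : Nat) (needed : List Int) (order : List (Nat × Nat)) (fuel : Nat) (acc : List Int),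
      needed.length + order.length + (order.map Prod.fst).sum ≤ M →
      needed.length < fuel →
      ftInv needed items order →
      (∀ g ∈ needed, ∃ tg ∈ items, g ∈ tg.2) →
      ftA_go items fuel needed acc = ftB_go items needed order acc := by
  intro M
  induction M with
  | zero =>
    intro needed order fuel acc hM hfuel _ _
    have hn : needed = [] := List.length_eq_zero_iff.mp (by omega)
    subst hn
    match fuel, hfuel with
    | f + 1, _ =>
      rw [ftB_go_empty]
      simp [ftA_go]
  | succ M ih =>
    intro needed order fuel acc hM hfuel hinv hpre
    by_cases hne : needed = []
    · subst hne
      match fuel, hfuel with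
      | f + 1, _ =>
        rw [ftB_go_empty]
        simp [ftA_go]
    · have hone : order ≠ [] := ftOrder_ne_nil needed items order hinv hne hpre
      match order, hone with
      | (s, i) :: rest, _ =>
        match fuel, hfuel with
        | f + 1, hfuel =>
          have hent := hinv.2.2.1 (s, i) (List.mem_cons_self ..)
          have hub : ftTc needed items i ≤ s := hent.2.2
          have hcove : (ftCov needed (items.getD i (0, [])).2).length = ftTc needed items i :=
            rfl
          have hfilt : (needed.filter (fun x => (items.getD i (0, [])).2.contains x)).length
              = ftTc needed items i := rfl
          simp only [List.map_cons, List.sum_cons, List.length_cons] at hM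
          rcases Nat.lt_or_ge (ftTc needed items i) s with hstale | hge
          · -- stale pop: reinsert / drop, A side unchanged
            rw [ftB_go_cons items needed s i rest acc hne, if_pos (by omega)]
            rw [← ih needed _ (f + 1) acc ?_ hfuel
              (ftInv_stale needed items s i rest ⟨hinv.1, hinv.2.1, hinv.2.2.1, hinv.2.2.2⟩
                hstale) hpre]
            split_ifs with h
            · rw [ftInsert_length, ftInsert_sum]
              omega
            · omega
          · -- fresh pop: both select ticket i
            have hfresh : ftTc needed items i = s := le_antisymm hub hge
            have hscan := ftA_scan_of_inv needed items s i rest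
              ⟨hinv.1, hinv.2.1, hinv.2.2.1, hinv.2.2.2⟩ hfresh
            have hs1 : 1 ≤ s := hent.2.1
            have hcovne : needed.filter (fun x => (items.getD i (0, [])).2.contains x) ≠ [] := by
              intro hcon
              have := congrArg List.length hcon
              rw [hfilt] at this
              simp at this
              omega
            rw [ftB_go_cons items needed s i rest acc hne, if_neg (by omega)]
            show ftA_go items (f + 1) needed acc = _
            rw [ftA_go]
            simp only [List.isEmpty_iff, hne, if_false, hscan, hcovne]
            have hneed' : (needed.filter
                (fun x => !(needed.filter
                  (fun x => (items.getD i (0, [])).2.contains x)).contains x)).length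
                < needed.length := by
              apply ftCov_shrinks
              · intro x hx
                exact (List.mem_filter.mp hx).1
              · exact hcovne
            have hsel := ftInv_select needed items s i rest
              ⟨hinv.1, hinv.2.1, hinv.2.2.1, hinv.2.2.2⟩
            unfold ftCov at hsel
            refine ih _ rest f _ ?_ (by omega) hsel
              (fun g hg => hpre g (List.mem_of_mem_filter hg))
            have hle := List.length_filter_le
              (fun x => !(needed.filter
                (fun x => (items.getD i (0, [])).2.contains x)).contains x) needed
            omega

-- the build loop establishes the invariant
theorem ftBuild_inv_aux (gn : List Int) (items : List (Int × List Int)) :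
    ∀ (l : List (Int × List Int)) (k : Nat) (ord : List (Nat × Nat)),
      (∀ j, j < l.length → items.getD (k + j) (0, []) = l.getD j (0, [])) →
      ord.Pairwise (fun a b => ftBetter a b = true) →
      (ord.map Prod.snd).Nodup →
      (∀ e ∈ ord, e.2 < k ∧ 1 ≤ e.1 ∧ ftTc gn items e.2 ≤ e.1) →
      (∀ i, i < k → 1 ≤ ftTc gn items i → i ∈ ord.map Prod.snd) →
      ((l.zipIdx k).foldl
          (fun ord gi =>
            if (ftCov gn gi.1.2).length ≠ 0 then
              ftInsert ((ftCov gn gi.1.2).length, gi.2) ord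
            else ord) ord).Pairwise (fun a b => ftBetter a b = true) ∧
      (((l.zipIdx k).foldl
          (fun ord gi =>
            if (ftCov gn gi.1.2).length ≠ 0 then
              ftInsert ((ftCov gn gi.1.2).length, gi.2) ord
            else ord) ord).map Prod.snd).Nodup ∧
      (∀ e ∈ (l.zipIdx k).foldl
          (fun ord gi =>
            if (ftCov gn gi.1.2).length ≠ 0 then
              ftInsert ((ftCov gn gi.1.2).length, gi.2) ord
            else ord) ord, e.2 < k + l.length ∧ 1 ≤ e.1 ∧ ftTc gn items e.2 ≤ e.1) ∧
      (∀ i, i < k + l.length → 1 ≤ ftTc gn items i →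
        i ∈ ((l.zipIdx k).foldl
          (fun ord gi =>
            if (ftCov gn gi.1.2).length ≠ 0 then
              ftInsert ((ftCov gn gi.1.2).length, gi.2) ord
            else ord) ord).map Prod.snd) := by
  intro l
  induction l with
  | nil =>
    intro k ord _ h1 h2 h3 h4
    exact ⟨h1, h2, fun e he => by simpa using h3 e he,
      fun i hi => h4 i (by simp only [List.length_nil] at hi; omega)⟩
  | cons tg ts ihl =>
    intro k ord hmatch h1 h2 h3 h4
    have hk : items.getD k (0, []) = tg := by
      have := hmatch 0 (by simp)
      simpa using this
    have htc : ftTc gn items k = (ftCov gn tg.2).length := by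
      unfold ftTc
      rw [hk]
    have hmatch' : ∀ j, j < ts.length → items.getD (k + 1 + j) (0, []) = ts.getD j (0, []) := by
      intro j hj
      have := hmatch (j + 1) (by simp only [List.length_cons]; omega)
      rw [show k + (j + 1) = k + 1 + j by omega] at this
      exact this
    rw [List.zipIdx_cons, List.foldl_cons]
    by_cases hc : (ftCov gn tg.2).length ≠ 0
    · have hkni : k ∉ ord.map Prod.snd := by
        intro hcon
        rcases List.mem_map.mp hcon with ⟨e, he, hek⟩
        have := (h3 e he).1
        omega
      have hres := ihl (k + 1) (ftInsert ((ftCov gn tg.2).length, k) ord) hmatch'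
        (ftInsert_pairwise _ _ h1 (fun x hx hxk => by
          have hxk' : x.2 = k := hxk
          have hmm : x.2 ∈ ord.map Prod.snd := List.mem_map.mpr ⟨x, hx, rfl⟩
          rw [hxk'] at hmm
          exact hkni hmm))
        (by
          rw [((ftInsert_perm _ _).map Prod.snd).nodup_iff, List.map_cons]
          exact List.nodup_cons.mpr ⟨hkni, h2⟩)
        (by
          intro e he
          rcases List.mem_cons.mp ((ftInsert_perm _ _).mem_iff.mp he) with rfl | he
          · exact ⟨Nat.lt_succ_self k, Nat.one_le_iff_ne_zero.mpr hc, le_of_eq htc⟩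
          · have := h3 e he
            exact ⟨by omega, this.2.1, this.2.2⟩)
        (by
          intro j hj hj1
          rcases Nat.lt_or_ge j k with h | h
          · exact ((ftInsert_perm _ _).map Prod.snd).mem_iff.mpr
              (List.mem_cons_of_mem _ (h4 j h hj1))
          · have hjk : j = k := by omega
            subst hjk
            exact ((ftInsert_perm _ _).map Prod.snd).mem_iff.mpr
              (by rw [List.map_cons]; exact List.mem_cons_self ..))
      simp only [show (fun ord gi => if (ftCov gn gi.1.2).length ≠ 0 then
        ftInsert ((ftCov gn gi.1.2).length, gi.2) ord else ord) ord (tg, k)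
          = ftInsert ((ftCov gn tg.2).length, k) ord from if_pos hc]
      obtain ⟨g1, g2, g3, g4⟩ := hres
      refine ⟨g1, g2, fun e he => ?_, fun j hj hj1 => g4 j ?_ hj1⟩
      · have := g3 e he
        exact ⟨by simp only [List.length_cons] at this ⊢; omega, this.2.1, this.2.2⟩
      · simp only [List.length_cons] at hj
        omega
    · have hres := ihl (k + 1) ord hmatch' h1 h2
        (fun e he => ⟨by have := (h3 e he).1; omega, (h3 e he).2.1, (h3 e he).2.2⟩)
        (by
          intro j hj hj1
          rcases Nat.lt_or_ge j k with h | h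
          · exact h4 j h hj1
          · exfalso
            have hjk : j = k := by omega
            subst hjk
            rw [htc] at hj1
            omega)
      simp only [show (fun ord gi => if (ftCov gn gi.1.2).length ≠ 0 then
        ftInsert ((ftCov gn gi.1.2).length, gi.2) ord else ord) ord (tg, k) = ord from by
          simp [hc]]
      obtain ⟨g1, g2, g3, g4⟩ := hres
      refine ⟨g1, g2, fun e he => ?_, fun j hj hj1 => g4 j ?_ hj1⟩
      · have := g3 e he
        exact ⟨by simp only [List.length_cons] at this ⊢; omega, this.2.1, this.2.2⟩
      · simp only [List.length_cons] at hj
        omega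

theorem ftBuild_inv (gn : List Int) (items : List (Int × List Int)) :
    ftInv gn items (ftBuild gn items) := by
  have hres := ftBuild_inv_aux gn items items 0 []
    (fun j hj => by simp)
    (by simp)
    (by simp)
    (by simp)
    (by intro i hi; omega)
  unfold ftBuild
  exact ⟨hres.1, hres.2.1,
    fun e he => by
      have := hres.2.2.1 e he
      exact ⟨by simpa using this.1, this.2.1, this.2.2⟩,
    fun i hi => hres.2.2.2 i (by simpa using hi)⟩

-- ===== VERDICT (by name: the statement is the Claim_ definition above) =====
theorem final_tickets_spec : Claim_equal_final_tickets := by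
  intro groups_needed tickets _ hpre
  unfold Spec_final_tickets final_tickets final_tickets_alt
  exact ftBisim tickets
    (groups_needed.length + (ftBuild groups_needed tickets).length
      + ((ftBuild groups_needed tickets).map Prod.fst).sum)
    groups_needed (ftBuild groups_needed tickets) (groups_needed.length + 1) []
    le_rfl (by omega) (ftBuild_inv groups_needed tickets) hpre
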